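-- pv_equiv track=rewrite | github.com/JMY-Dev-Team/GenshinOJ | ws_server/ws_server_applications/simple_ws_server_application.py | generate_session_token
-- ===== SOURCE A (Python) =====
-- def generate_session_token(session_token_seed: int) -> str:
--     if session_token_seed > 1:
--         generated_session_token = ""
--         generated_session_token = (
--             generated_session_token
--             + chr(session_token_seed * 1 % 26 + ord("a"))
--             + chr(session_token_seed * 3 % 26 + ord("a"))
--             + chr(session_token_seed * 5 % 26 + ord("a"))
--             + chr(session_token_seed * 7 % 26 + ord("a"))
--             + chr(session_token_seed * 9 % 26 + ord("a"))
--             + chr(session_token_seed * 11 % 26 + ord("a"))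
--             + chr(session_token_seed * 13 % 26 + ord("a"))
--             + chr(session_token_seed * 15 % 26 + ord("a"))
--         )
--         return generated_session_token + generate_session_token(
--             int(session_token_seed / 5)
--         )
--     else:
--         return "s"
-- ===== SOURCE B (Python) =====
-- def generate_session_token(session_token_seed: int) -> str:
--     chars = []
--     while session_token_seed > 1:
--         for k in range(1, 16, 2):
--             chars.append(chr(session_token_seed * k % 26 + ord("a")))
--         session_token_seed = int(session_token_seed / 5)
--     chars.append("s")
--     return "".join(chars)
-- ===== Notes on version B (the rewrite author's own statement) =====
-- stated objective: simpler
-- what changed: Replaces the direct recursion with eight hand-written chr concatenations per level by an iterative while-loop whose inner for-loop over the odd multipliers 1..15 appends characters to a list joined once at the end.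
import Mathlib
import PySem

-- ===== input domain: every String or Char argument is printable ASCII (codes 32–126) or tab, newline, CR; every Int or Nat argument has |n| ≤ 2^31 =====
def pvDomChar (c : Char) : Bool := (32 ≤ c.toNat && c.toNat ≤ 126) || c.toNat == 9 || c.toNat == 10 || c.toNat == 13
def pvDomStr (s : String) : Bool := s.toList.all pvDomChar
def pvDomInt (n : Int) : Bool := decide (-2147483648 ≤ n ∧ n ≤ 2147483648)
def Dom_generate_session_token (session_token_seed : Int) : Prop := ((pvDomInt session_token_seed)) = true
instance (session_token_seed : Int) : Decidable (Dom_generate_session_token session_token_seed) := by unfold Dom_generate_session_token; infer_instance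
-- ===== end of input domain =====

-- B replaces A's direct recursion (eight hand-written string concatenations per level) by an
-- iterative while-loop over the seed with an inner for-loop over the odd multipliers 1..15,
-- accumulating characters in a list joined once at the end (objective: simpler/idiomatic).
-- `int(seed / 5)` truncates toward zero; on 1 < seed it equals Int.tdiv (exact on Dom, where
-- |seed| ≤ 2^31 keeps the float division exact).

-- termination measure for both ports (cited in decreasing_by)
theorem pvTdivLt (s : Int) (h : 1 < s) : (s.tdiv 5).toNat < s.toNat := by
  rw [Int.tdiv_eq_ediv_of_nonneg (by omega)]; omega

-- ===== PORT A =====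
def generate_session_token (session_token_seed : Int) : String :=
  if session_token_seed > 1 then
    let generated_session_token := ""
    let generated_session_token :=
      generated_session_token
      ++ String.singleton (Char.ofNat (PySem.Int.mod (session_token_seed * 1) 26 + 97).toNat)
      ++ String.singleton (Char.ofNat (PySem.Int.mod (session_token_seed * 3) 26 + 97).toNat)
      ++ String.singleton (Char.ofNat (PySem.Int.mod (session_token_seed * 5) 26 + 97).toNat)
      ++ String.singleton (Char.ofNat (PySem.Int.mod (session_token_seed * 7) 26 + 97).toNat)
      ++ String.singleton (Char.ofNat (PySem.Int.mod (session_token_seed * 9) 26 + 97).toNat)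
      ++ String.singleton (Char.ofNat (PySem.Int.mod (session_token_seed * 11) 26 + 97).toNat)
      ++ String.singleton (Char.ofNat (PySem.Int.mod (session_token_seed * 13) 26 + 97).toNat)
      ++ String.singleton (Char.ofNat (PySem.Int.mod (session_token_seed * 15) 26 + 97).toNat)
    generated_session_token ++ generate_session_token (session_token_seed.tdiv 5)
  else "s"
termination_by session_token_seed.toNat
decreasing_by exact pvTdivLt _ (by omega)

-- ===== PORT B =====
-- the `while session_token_seed > 1` loop of Source B, with `chars` the accumulated list
def pvAltLoop (s : Int) (chars : List Char) : List Char :=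
  if s > 1 then
    pvAltLoop (s.tdiv 5)
      ((PySem.List.pyRange 1 16 2).foldl
        (fun cs k => cs ++ [Char.ofNat (PySem.Int.mod (s * k) 26 + 97).toNat]) chars)
  else chars
termination_by s.toNat
decreasing_by exact pvTdivLt _ (by omega)

def generate_session_token_alt (session_token_seed : Int) : String :=
  String.ofList (pvAltLoop session_token_seed [] ++ ['s'])

-- ===== PRECONDITION & SPEC =====
def Spec_generate_session_token (session_token_seed : Int) (out : String) : Prop := out = generate_session_token_alt session_token_seed
instance (session_token_seed : Int) (out : String) : Decidable (Spec_generate_session_token session_token_seed out) := by unfold Spec_generate_session_token; infer_instance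

-- ===== CLAIM (what is proved, stated in full; the proofs are below) =====
def Claim_equal_generate_session_token : Prop := ∀ (session_token_seed : Int), Dom_generate_session_token session_token_seed → Spec_generate_session_token session_token_seed (generate_session_token session_token_seed)

-- ===== LEMMAS AND PROOFS =====

-- the loop's accumulator factors out
theorem pvAltLoop_acc : ∀ (n : Nat) (s : Int), s.toNat = n → ∀ cs : List Char,
    pvAltLoop s cs = cs ++ pvAltLoop s [] := by
  intro n
  induction n using Nat.strong_induction_on with
  | _ n ih =>
    intro s hs cs
    have hr : PySem.List.pyRange 1 16 2 = ([1,3,5,7,9,11,13,15] : List Int) := by decide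
    by_cases h : s > 1
    · have h5 : (s.tdiv 5).toNat < n := by rw [← hs]; exact pvTdivLt s h
      conv_lhs => rw [pvAltLoop]
      conv_rhs => rw [pvAltLoop]
      rw [if_pos h, if_pos h]
      conv_rhs => rw [ih _ h5 _ rfl]
      rw [ih _ h5 _ rfl]
      simp [hr]
    · conv_lhs => rw [pvAltLoop]
      conv_rhs => rw [pvAltLoop]
      rw [if_neg h, if_neg h]
      simp

theorem pvA_toList : ∀ (n : Nat) (s : Int), s.toNat = n →
    (generate_session_token s).toList = pvAltLoop s [] ++ ['s'] := by
  intro n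
  induction n using Nat.strong_induction_on with
  | _ n ih =>
    intro s hs
    by_cases h : s > 1
    · have h5 : (s.tdiv 5).toNat < n := by rw [← hs]; exact pvTdivLt s h
      have hr : PySem.List.pyRange 1 16 2 = ([1,3,5,7,9,11,13,15] : List Int) := by decide
      conv_lhs => rw [generate_session_token]
      conv_rhs => rw [pvAltLoop]
      rw [if_pos h, if_pos h]
      simp only [hr]
      rw [pvAltLoop_acc _ (s.tdiv 5) rfl]
      simp [ih _ h5 (s.tdiv 5) rfl]
    · conv_lhs => rw [generate_session_token]
      conv_rhs => rw [pvAltLoop]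
      rw [if_neg h, if_neg h]
      decide

-- ===== VERDICT (by name: the statement is the Claim_ definition above) =====
theorem generate_session_token_spec : Claim_equal_generate_session_token := by
  intro s _
  show _ = _
  have h := pvA_toList s.toNat s rfl
  unfold generate_session_token_alt
  rw [← h]
  simp
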